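-- pv_equiv track=rewrite | github.com/mihaMaks/2022SegmentationST | evaluation/evaluate.py | f1_ver3
-- ===== SOURCE A (Python) =====
-- def compare_len(real_segm, pred_segm):
--     real = set()
--     pred = set()
--     real_str = ""
--     pred_str = ""
--     c = 0
--     for s in real_segm.split('|'):
--         real.add((c, s))
--         real_str += s
--         c += len(s)
--     r_len = c
--
--     c = 0
--     for s in pred_segm.split('|'):
--         pred.add((c, s))
--         pred_str += s
--         c += len(s)
--     p_len = c
--
--     if r_len != p_len or real_str != pred_str:
--         return False
--     return True
--
-- def f1_ver3(real_segm, pred_segm):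
--     if not compare_len(real_segm, pred_segm):
--         return 0, 0, 0
--
--     real = set()
--     pred = set()
--     c = 0
--     for s in real_segm.split("|")[:-1]:
--         c += len(s)
--         real.add(c)
--     c = 0
--     for s in pred_segm.split("|")[:-1]:
--         c += len(s)
--         pred.add(c)
--
--     true_positives = len(pred & real)
--     false_positives = len(pred - real)
--     false_negatives = len(real - pred)
--
--     if not real:
--         # monomorph - 0 if something predicted, 1 otherwise
--         true_positives = 0 if pred else 1
--         false_negatives = 1 if pred else 0
--
--     if not pred:
--         false_positives = 1 if real else false_positives
--
--     return true_positives, false_positives, false_negatives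
-- ===== SOURCE B (Python) =====
-- def _positions(s):
--     # sorted, deduplicated cumulative boundary positions: one char pass,
--     # a run of consecutive '|' contributes a single position
--     res = []
--     c = 0
--     prev_bar = False
--     for ch in s:
--         if ch == '|':
--             if not prev_bar:
--                 res.append(c)
--             prev_bar = True
--         else:
--             c += 1
--             prev_bar = False
--     return res
--
--
-- def f1_ver3(real_segm, pred_segm):
--     if [c for c in real_segm if c != '|'] != [c for c in pred_segm if c != '|']:
--         return 0, 0, 0
--     rp = _positions(real_segm)
--     pp = _positions(pred_segm)
--     tp = fp = fn = 0
--     i = j = 0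
--     while i < len(rp) and j < len(pp):
--         if rp[i] == pp[j]:
--             tp += 1; i += 1; j += 1
--         elif rp[i] < pp[j]:
--             fn += 1; i += 1
--         else:
--             fp += 1; j += 1
--     fn += len(rp) - i
--     fp += len(pp) - j
--     if not rp:
--         tp = 0 if pp else 1
--         fn = 1 if pp else 0
--     if not pp:
--         fp = 1 if rp else fp
--     return tp, fp, fn
-- ===== Notes on version B (the rewrite author's own statement) =====
-- stated objective: alternative
-- what changed: Replaces split('|') + hash-set algebra (intersection/differences of boundary-position sets, plus a set-building compare_len pass) with a single character pass that emits the sorted deduplicated boundary positions directly, and a two-pointer merge of the two sorted lists that counts TP/FP/FN; the guard becomes a plain comparison of the strings with '|' removed.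
import Mathlib
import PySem

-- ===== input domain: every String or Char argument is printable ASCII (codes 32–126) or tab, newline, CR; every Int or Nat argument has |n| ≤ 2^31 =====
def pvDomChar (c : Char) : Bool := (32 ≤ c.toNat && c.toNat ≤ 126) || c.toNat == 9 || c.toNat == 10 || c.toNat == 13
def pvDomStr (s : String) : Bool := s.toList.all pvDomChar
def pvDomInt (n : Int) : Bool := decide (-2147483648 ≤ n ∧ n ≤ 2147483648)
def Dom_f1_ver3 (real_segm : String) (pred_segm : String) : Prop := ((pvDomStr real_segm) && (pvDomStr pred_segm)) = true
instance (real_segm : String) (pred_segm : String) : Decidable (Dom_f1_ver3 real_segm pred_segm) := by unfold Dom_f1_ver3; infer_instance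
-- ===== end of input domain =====

-- B replaces split('|') + set algebra by one character pass producing the sorted
-- deduplicated boundary positions and a two-pointer merge counting TP/FP/FN.

-- ===== PORT A =====
def compare_len (real_segm : String) (pred_segm : String) : Bool :=
  let st1 := (PySem.Chars.splitOn real_segm.toList ['|']).foldl
    (fun (st : PySem.Set (Int × List Char) × List Char × Int) s =>
      (PySem.Set.add st.1 (st.2.2, s), st.2.1 ++ s, st.2.2 + (s.length : Int)))
    (PySem.Set.empty, [], 0)
  let st2 := (PySem.Chars.splitOn pred_segm.toList ['|']).foldl
    (fun (st : PySem.Set (Int × List Char) × List Char × Int) s =>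
      (PySem.Set.add st.1 (st.2.2, s), st.2.1 ++ s, st.2.2 + (s.length : Int)))
    (PySem.Set.empty, [], 0)
  if st1.2.2 != st2.2.2 || st1.2.1 != st2.2.1 then false else true

def f1_ver3 (real_segm : String) (pred_segm : String) : Int × Int × Int :=
  if ¬ (compare_len real_segm pred_segm = true) then (0, 0, 0)
  else
    let real := ((PySem.List.slice (PySem.Chars.splitOn real_segm.toList ['|']) none (some (-1))).foldl
      (fun (st : Int × PySem.Set Int) s => (st.1 + (s.length : Int), PySem.Set.add st.2 (st.1 + (s.length : Int))))
      (0, PySem.Set.empty)).2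
    let pred := ((PySem.List.slice (PySem.Chars.splitOn pred_segm.toList ['|']) none (some (-1))).foldl
      (fun (st : Int × PySem.Set Int) s => (st.1 + (s.length : Int), PySem.Set.add st.2 (st.1 + (s.length : Int))))
      (0, PySem.Set.empty)).2
    let true_positives := PySem.Set.len (PySem.Set.inter pred real)
    let false_positives := PySem.Set.len (PySem.Set.diff pred real)
    let false_negatives := PySem.Set.len (PySem.Set.diff real pred)
    let true_positives := if real = [] then (if pred ≠ [] then 0 else 1) else true_positives
    let false_negatives := if real = [] then (if pred ≠ [] then 1 else 0) else false_negatives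
    let false_positives := if pred = [] then (if real ≠ [] then 1 else false_positives) else false_positives
    (true_positives, false_positives, false_negatives)

-- ===== PORT B =====
-- one pass over the characters: the cumulative count of non-'|' chars at each run of '|'
def pvPosGo : List Char → Int → Bool → List Int
  | [], _, _ => []
  | ch :: rest, c, prevBar =>
    if ch = '|' then
      if prevBar then pvPosGo rest c true else c :: pvPosGo rest c true
    else pvPosGo rest (c + 1) false

-- two-pointer merge of the two sorted position lists
def pvMerge : List Int → List Int → Int × Int × Int
  | [], pp => (0, (pp.length : Int), 0)
  | r :: rs, [] => (0, 0, ((r :: rs).length : Int))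
  | r :: rs, p :: ps =>
    if r = p then
      let t := pvMerge rs ps; (t.1 + 1, t.2.1, t.2.2)
    else if r < p then
      let t := pvMerge rs (p :: ps); (t.1, t.2.1, t.2.2 + 1)
    else
      let t := pvMerge (r :: rs) ps; (t.1, t.2.1 + 1, t.2.2)
  termination_by rp pp => rp.length + pp.length

def f1_ver3_alt (real_segm : String) (pred_segm : String) : Int × Int × Int :=
  if real_segm.toList.filter (fun c => c ≠ '|') ≠ pred_segm.toList.filter (fun c => c ≠ '|') then (0, 0, 0)
  else
    let rp := pvPosGo real_segm.toList 0 false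
    let pp := pvPosGo pred_segm.toList 0 false
    let t := pvMerge rp pp
    let tp := if rp = [] then (if pp ≠ [] then 0 else 1) else t.1
    let fn := if rp = [] then (if pp ≠ [] then 1 else 0) else t.2.2
    let fp := if pp = [] then (if rp ≠ [] then 1 else t.2.1) else t.2.1
    (tp, fp, fn)

-- ===== PRECONDITION & SPEC =====
def Spec_f1_ver3 (real_segm : String) (pred_segm : String) (out : Int × Int × Int) : Prop := out = f1_ver3_alt real_segm pred_segm
instance (real_segm : String) (pred_segm : String) (out : Int × Int × Int) : Decidable (Spec_f1_ver3 real_segm pred_segm out) := by unfold Spec_f1_ver3; infer_instance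

-- ===== CLAIM (what is proved, stated in full; the proofs are below) =====
def Claim_equal_f1_ver3 : Prop := ∀ (real_segm : String) (pred_segm : String), Dom_f1_ver3 real_segm pred_segm → Spec_f1_ver3 real_segm pred_segm (f1_ver3 real_segm pred_segm)

-- ===== LEMMAS AND PROOFS =====

-- a direct structural recursion equal to Chars.splitOn · ['|']
def pvSimpleSplit : List Char → List (List Char)
  | [] => [[]]
  | c :: rest =>
    if c = '|' then [] :: pvSimpleSplit rest
    else match pvSimpleSplit rest with
      | [] => [[c]]
      | p :: ps => (c :: p) :: ps

-- cumulative sums (c + len s) along segments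
def pvCsums : List (List Char) → Int → List Int
  | [], _ => []
  | s :: r, c => (c + (s.length : Int)) :: pvCsums r (c + (s.length : Int))

-- position of each '|' = count of non-'|' chars before it (with duplicates)
def pvBars : List Char → Int → List Int
  | [], _ => []
  | ch :: r, c => if ch = '|' then c :: pvBars r c else pvBars r (c + 1)

theorem pvSimpleSplit_ne_nil (cs : List Char) : pvSimpleSplit cs ≠ [] := by
  induction cs with
  | nil => simp [pvSimpleSplit]
  | cons c rest ih =>
    simp only [pvSimpleSplit]
    split
    · simp
    · cases h : pvSimpleSplit rest <;> simp

theorem pvSplitOn_go_eq (fuel : Nat) :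
    ∀ (l cur : List Char) (accs : List (List Char)), l.length < fuel →
    PySem.Chars.splitOn.go ['|'] fuel l cur accs =
      accs.reverse ++ (match pvSimpleSplit l with
        | [] => [cur.reverse]
        | p :: ps => (cur.reverse ++ p) :: ps) := by
  induction fuel with
  | zero => intro l cur accs h; omega
  | succ n ih =>
    intro l cur accs h
    cases l with
    | nil =>
      rw [PySem.Chars.splitOn.go]
      · simp [pvSimpleSplit]
      · omega
    | cons c rest =>
      rw [PySem.Chars.splitOn.go]
      by_cases hc : c = '|'
      · subst hc
        have hpre : ['|'].isPrefixOf ('|' :: rest) = true := by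
          simp [List.isPrefixOf]
        rw [if_pos hpre]
        simp only [List.length_singleton, List.drop_one, List.tail_cons]
        rw [ih rest [] (cur.reverse :: accs) (by simpa using Nat.lt_of_succ_lt_succ h)]
        simp only [pvSimpleSplit]
        cases hs : pvSimpleSplit rest with
        | nil => exact absurd hs (pvSimpleSplit_ne_nil rest)
        | cons p ps => simp
      · have hpre : ['|'].isPrefixOf (c :: rest) = false := by
          simp [List.isPrefixOf]
          exact fun hcc => absurd hcc.symm hc
        rw [if_neg (by simp [hpre])]
        rw [ih rest (c :: cur) accs (by simpa using Nat.lt_of_succ_lt_succ h)]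
        simp only [pvSimpleSplit, if_neg hc]
        cases hs : pvSimpleSplit rest with
        | nil => exact absurd hs (pvSimpleSplit_ne_nil rest)
        | cons p ps => simp

theorem pvSplitOn_eq (cs : List Char) :
    PySem.Chars.splitOn cs ['|'] = pvSimpleSplit cs := by
  unfold PySem.Chars.splitOn
  rw [pvSplitOn_go_eq (cs.length + 1) cs [] [] (by omega)]
  cases hs : pvSimpleSplit cs with
  | nil => exact absurd hs (pvSimpleSplit_ne_nil cs)
  | cons p ps => simp

theorem pvFlatten_simpleSplit (cs : List Char) :
    (pvSimpleSplit cs).flatten = cs.filter (fun c => c ≠ '|') := by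
  induction cs with
  | nil => simp [pvSimpleSplit]
  | cons c rest ih =>
    by_cases hc : c = '|'
    · subst hc
      rw [show pvSimpleSplit ('|' :: rest) = [] :: pvSimpleSplit rest from by simp [pvSimpleSplit]]
      simp only [List.flatten_cons, List.nil_append]
      rw [ih, List.filter_cons_of_neg (by simp)]
    · simp only [pvSimpleSplit, if_neg hc]
      cases hs : pvSimpleSplit rest with
      | nil => exact absurd hs (pvSimpleSplit_ne_nil rest)
      | cons p ps =>
        rw [hs] at ih
        simp only [List.flatten_cons] at ih ⊢
        simp [hc, ih]

theorem pvCsums_dropLast (cs : List Char) (c : Int) :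
    pvCsums ((pvSimpleSplit cs).dropLast) c = pvBars cs c := by
  induction cs generalizing c with
  | nil => simp [pvSimpleSplit, pvBars, pvCsums]
  | cons ch rest ih =>
    by_cases hc : ch = '|'
    · subst hc
      rw [show pvSimpleSplit ('|' :: rest) = [] :: pvSimpleSplit rest from by simp [pvSimpleSplit],
         show pvBars ('|' :: rest) c = c :: pvBars rest c from by simp [pvBars]]
      cases hs : pvSimpleSplit rest with
      | nil => exact absurd hs (pvSimpleSplit_ne_nil rest)
      | cons p ps =>
        rw [List.dropLast_cons_of_ne_nil (by simp)]
        have hthis := ih c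
        rw [hs] at hthis
        simp only [pvCsums, List.length_nil, Int.natCast_zero, add_zero]
        rw [hthis]
    · simp only [pvSimpleSplit, if_neg hc, pvBars]
      have hthis := ih (c + 1)
      cases hs : pvSimpleSplit rest with
      | nil => exact absurd hs (pvSimpleSplit_ne_nil rest)
      | cons p ps =>
        rw [hs] at hthis
        rw [← hthis]
        cases ps with
        | nil => simp [pvCsums]
        | cons q qs =>
          simp only [List.dropLast_cons₂, pvCsums, List.length_cons]
          have harith : c + ((p.length + 1 : Nat) : Int) = c + 1 + (p.length : Int) := by push_cast; ring
          rw [harith]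

theorem pvBars_ge (cs : List Char) (c : Int) : ∀ x ∈ pvBars cs c, c ≤ x := by
  induction cs generalizing c with
  | nil => simp [pvBars]
  | cons ch rest ih =>
    simp only [pvBars]
    split
    · intro x hx
      rcases List.mem_cons.mp hx with h | h
      · omega
      · exact ih c x h
    · intro x hx
      have := ih (c + 1) x hx
      omega

theorem pvPosGo_spec (cs : List Char) (c : Int) :
    pvPosGo cs c false = PySem.Set.ofList (pvBars cs c) ∧
    pvPosGo cs c true = PySem.Set.discard (PySem.Set.ofList (pvBars cs c)) c := by
  induction cs generalizing c with
  | nil => simp [pvPosGo, pvBars, PySem.Set.ofList, PySem.Set.discard]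
  | cons ch rest ih =>
    by_cases hch : ch = '|'
    · subst hch
      rw [show pvBars ('|' :: rest) c = c :: pvBars rest c from by simp [pvBars]]
      constructor
      · rw [show pvPosGo ('|' :: rest) c false = c :: pvPosGo rest c true from by simp [pvPosGo]]
        rw [PySem.Set.ofList_cons, (ih c).2]
      · rw [show pvPosGo ('|' :: rest) c true = pvPosGo rest c true from by simp [pvPosGo]]
        rw [PySem.Set.ofList_cons, (ih c).2]
        simp [PySem.Set.discard, List.filter_filter]
    · rw [show pvBars (ch :: rest) c = pvBars rest (c + 1) from by simp [pvBars, hch]]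
      have hfalse : pvPosGo (ch :: rest) c false = pvPosGo rest (c + 1) false := by
        simp [pvPosGo, hch]
      have htrue : pvPosGo (ch :: rest) c true = pvPosGo rest (c + 1) false := by
        simp [pvPosGo, hch]
      refine ⟨by rw [hfalse, (ih (c + 1)).1], ?_⟩
      rw [htrue, (ih (c + 1)).1]
      have : ∀ y ∈ PySem.Set.ofList (pvBars rest (c + 1)), (!(y == c)) = true := by
        intro y hy
        have := pvBars_ge rest (c + 1) y ((PySem.Set.mem_ofList _ _).mp hy)
        simp only [Bool.not_eq_eq_eq_not, Bool.not_true, beq_eq_false_iff_ne]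
        omega
      unfold PySem.Set.discard
      exact (List.filter_eq_self.mpr this).symm

theorem pvPosGo_lb (cs : List Char) (c : Int) :
    (∀ x ∈ pvPosGo cs c false, c ≤ x) ∧ (∀ x ∈ pvPosGo cs c true, c < x) := by
  induction cs generalizing c with
  | nil => simp [pvPosGo]
  | cons ch rest ih =>
    by_cases hch : ch = '|'
    · subst hch
      constructor
      · intro x hx
        rw [show pvPosGo ('|' :: rest) c false = c :: pvPosGo rest c true from by simp [pvPosGo]] at hx
        rcases List.mem_cons.mp hx with h | h
        · omega
        · exact le_of_lt ((ih c).2 x h)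
      · intro x hx
        rw [show pvPosGo ('|' :: rest) c true = pvPosGo rest c true from by simp [pvPosGo]] at hx
        exact (ih c).2 x hx
    · constructor
      · intro x hx
        rw [show pvPosGo (ch :: rest) c false = pvPosGo rest (c + 1) false from by simp [pvPosGo, hch]] at hx
        have := (ih (c + 1)).1 x hx
        omega
      · intro x hx
        rw [show pvPosGo (ch :: rest) c true = pvPosGo rest (c + 1) false from by simp [pvPosGo, hch]] at hx
        have := (ih (c + 1)).1 x hx
        omega

theorem pvPosGo_pairwise (cs : List Char) (c : Int) (b : Bool) :
    (pvPosGo cs c b).Pairwise (· < ·) := by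
  induction cs generalizing c b with
  | nil => simp [pvPosGo]
  | cons ch rest ih =>
    by_cases hch : ch = '|'
    · subst hch
      cases b with
      | true =>
        rw [show pvPosGo ('|' :: rest) c true = pvPosGo rest c true from by simp [pvPosGo]]
        exact ih c true
      | false =>
        rw [show pvPosGo ('|' :: rest) c false = c :: pvPosGo rest c true from by simp [pvPosGo]]
        exact List.pairwise_cons.mpr ⟨fun x hx => (pvPosGo_lb rest c).2 x hx, ih c true⟩
    · rw [show pvPosGo (ch :: rest) c b = pvPosGo rest (c + 1) false from by cases b <;> simp [pvPosGo, hch]]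
      exact ih (c + 1) false

theorem pvMemConsNe {x a : Int} (l : List Int) (h : x ≠ a) :
    decide (x ∈ a :: l) = decide (x ∈ l) := by
  simp [List.mem_cons, h]

theorem pvMerge_spec (rp pp : List Int) (hr : rp.Pairwise (· < ·)) (hp : pp.Pairwise (· < ·)) :
    pvMerge rp pp = (((pp.filter (fun x => decide (x ∈ rp))).length : Int),
                     ((pp.filter (fun x => !decide (x ∈ rp))).length : Int),
                     ((rp.filter (fun x => !decide (x ∈ pp))).length : Int)) := by
  revert hr hp
  induction rp, pp using pvMerge.induct with
  | case1 pp =>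
    intro hr hp
    simp [pvMerge]
  | case2 r rs =>
    intro hr hp
    simp [pvMerge]
  | case3 rs p ps ih =>
    intro hr hp
    obtain ⟨hrall, hrt⟩ := List.pairwise_cons.mp hr
    obtain ⟨hpall, hpt⟩ := List.pairwise_cons.mp hp
    have h1 : List.filter (fun x => decide (x ∈ p :: rs)) (p :: ps)
        = p :: List.filter (fun x => decide (x ∈ rs)) ps := by
      rw [List.filter_cons_of_pos (by simp)]
      congr 1
      apply List.filter_congr
      intro x hx
      exact pvMemConsNe rs (hpall x hx).ne'
    have h2 : List.filter (fun x => !decide (x ∈ p :: rs)) (p :: ps)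
        = List.filter (fun x => !decide (x ∈ rs)) ps := by
      rw [List.filter_cons_of_neg (by simp)]
      apply List.filter_congr
      intro x hx
      rw [pvMemConsNe rs (hpall x hx).ne']
    have h3 : List.filter (fun x => !decide (x ∈ p :: ps)) (p :: rs)
        = List.filter (fun x => !decide (x ∈ ps)) rs := by
      rw [List.filter_cons_of_neg (by simp)]
      apply List.filter_congr
      intro x hx
      rw [pvMemConsNe ps (hrall x hx).ne']
    simp only [pvMerge]
    rw [ih hrt hpt, h1, h2, h3]
    simp only [List.length_cons]
    push_cast
    rfl
  | case4 r rs p ps hne hlt ih =>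
    intro hr hp
    obtain ⟨hrall, hrt⟩ := List.pairwise_cons.mp hr
    obtain ⟨hpall, hpt⟩ := List.pairwise_cons.mp hp
    have hnr : ∀ x ∈ p :: ps, x ≠ r := by
      intro x hx
      rcases List.mem_cons.mp hx with h | h
      · omega
      · have := hpall x h; omega
    have e1 : List.filter (fun x => decide (x ∈ r :: rs)) (p :: ps)
        = List.filter (fun x => decide (x ∈ rs)) (p :: ps) := by
      apply List.filter_congr
      intro x hx
      exact pvMemConsNe rs (hnr x hx)
    have e2 : List.filter (fun x => !decide (x ∈ r :: rs)) (p :: ps)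
        = List.filter (fun x => !decide (x ∈ rs)) (p :: ps) := by
      apply List.filter_congr
      intro x hx
      rw [pvMemConsNe rs (hnr x hx)]
    have hrm : r ∉ p :: ps := by
      intro hmem
      rcases List.mem_cons.mp hmem with h | h
      · omega
      · have := hpall r h; omega
    have e3 : List.filter (fun x => !decide (x ∈ p :: ps)) (r :: rs)
        = r :: List.filter (fun x => !decide (x ∈ p :: ps)) rs := by
      rw [List.filter_cons_of_pos (by simpa using hrm)]
    simp only [pvMerge, if_neg hne, if_pos hlt]
    rw [ih hrt hp, e1, e2, e3]
    simp only [List.length_cons]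
    push_cast
    rfl
  | case5 r rs p ps hne hnlt ih =>
    intro hr hp
    obtain ⟨hrall, hrt⟩ := List.pairwise_cons.mp hr
    obtain ⟨hpall, hpt⟩ := List.pairwise_cons.mp hp
    have hpr : p < r := by omega
    have hnp : ∀ x ∈ r :: rs, x ≠ p := by
      intro x hx
      rcases List.mem_cons.mp hx with h | h
      · omega
      · have := hrall x h; omega
    have hpm : p ∉ r :: rs := by
      intro hmem
      rcases List.mem_cons.mp hmem with h | h
      · omega
      · have := hrall p h; omega
    have e1 : List.filter (fun x => decide (x ∈ r :: rs)) (p :: ps)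
        = List.filter (fun x => decide (x ∈ r :: rs)) ps := by
      rw [List.filter_cons_of_neg (by simpa using hpm)]
    have e2 : List.filter (fun x => !decide (x ∈ r :: rs)) (p :: ps)
        = p :: List.filter (fun x => !decide (x ∈ r :: rs)) ps := by
      rw [List.filter_cons_of_pos (by simpa using hpm)]
    have e3 : List.filter (fun x => !decide (x ∈ p :: ps)) (r :: rs)
        = List.filter (fun x => !decide (x ∈ ps)) (r :: rs) := by
      apply List.filter_congr
      intro x hx
      rw [pvMemConsNe ps (hnp x hx)]
    simp only [pvMerge, if_neg hne, if_neg hnlt]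
    rw [ih hr hpt, e1, e2, e3]
    simp only [List.length_cons]
    push_cast
    rfl

theorem pvFoldA (segs : List (List Char)) (c : Int) (s0 : PySem.Set Int) :
    (segs.foldl (fun (st : Int × PySem.Set Int) s =>
        (st.1 + (s.length : Int), PySem.Set.add st.2 (st.1 + (s.length : Int)))) (c, s0)).2
      = PySem.Set.update s0 (pvCsums segs c) := by
  induction segs generalizing c s0 with
  | nil => simp [pvCsums, PySem.Set.update]
  | cons s r ih =>
    simp only [List.foldl_cons]
    rw [ih, pvCsums, PySem.Set.update_cons]

theorem pvFoldC (segs : List (List Char)) (st0 : PySem.Set (Int × List Char) × List Char × Int) :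
    (segs.foldl (fun (st : PySem.Set (Int × List Char) × List Char × Int) s =>
        (PySem.Set.add st.1 (st.2.2, s), st.2.1 ++ s, st.2.2 + (s.length : Int))) st0).2
      = (st0.2.1 ++ segs.flatten, st0.2.2 + (segs.flatten.length : Int)) := by
  induction segs generalizing st0 with
  | nil => simp
  | cons s r ih =>
    simp only [List.foldl_cons]
    rw [ih]
    simp only [List.flatten_cons]
    simp only [Prod.mk.injEq]
    exact ⟨by rw [List.append_assoc], by rw [List.length_append]; push_cast; ring⟩

theorem pvCompareLen_iff (real_segm pred_segm : String) :
    compare_len real_segm pred_segm = true ↔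
      real_segm.toList.filter (fun c => c ≠ '|') = pred_segm.toList.filter (fun c => c ≠ '|') := by
  unfold compare_len
  dsimp only
  rw [pvFoldC, pvFoldC]
  simp only [List.nil_append, zero_add]
  rw [pvSplitOn_eq, pvSplitOn_eq, pvFlatten_simpleSplit, pvFlatten_simpleSplit]
  by_cases hxy : List.filter (fun c => decide (c ≠ '|')) real_segm.toList = List.filter (fun c => decide (c ≠ '|')) pred_segm.toList
  · have hxy' : List.filter (fun c => !decide (c = '|')) real_segm.toList = List.filter (fun c => !decide (c = '|')) pred_segm.toList := by
      simpa using hxy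
    simp [hxy']
  · have hxy' : ¬ (List.filter (fun c => !decide (c = '|')) real_segm.toList = List.filter (fun c => !decide (c = '|')) pred_segm.toList) := by
      simpa using hxy
    simp [hxy']

theorem pvRealSet_eq (s : String) :
    ((PySem.List.slice (PySem.Chars.splitOn s.toList ['|']) none (some (-1))).foldl
      (fun (st : Int × PySem.Set Int) seg => (st.1 + (seg.length : Int), PySem.Set.add st.2 (st.1 + (seg.length : Int))))
      (0, PySem.Set.empty)).2 = pvPosGo s.toList 0 false := by
  rw [PySem.List.slice_to_neg_one, pvSplitOn_eq, pvFoldA, PySem.Set.update_empty,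
     pvCsums_dropLast, ← (pvPosGo_spec s.toList 0).1]

-- ===== VERDICT (by name: the statement is the Claim_ definition above) =====
theorem pvContainsEq (l : List Int) (a : Int) : l.contains a = decide (a ∈ l) := by
  simp

theorem f1_ver3_spec : Claim_equal_f1_ver3 := by
  intro real_segm pred_segm _
  unfold Spec_f1_ver3 f1_ver3 f1_ver3_alt
  by_cases h : real_segm.toList.filter (fun c => c ≠ '|') = pred_segm.toList.filter (fun c => c ≠ '|')
  · have hcl : compare_len real_segm pred_segm = true := (pvCompareLen_iff _ _).mpr h
    rw [if_neg (by simp [hcl]), if_neg (not_not_intro h)]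
    dsimp only
    rw [pvRealSet_eq, pvRealSet_eq]
    rw [pvMerge_spec _ _ (pvPosGo_pairwise _ _ _) (pvPosGo_pairwise _ _ _)]
    simp only [PySem.Set.len, PySem.Set.inter, PySem.Set.diff, PySem.Set.contains_eq_listContains, pvContainsEq]
  · have hcl : ¬ compare_len real_segm pred_segm = true :=
      fun hc => h ((pvCompareLen_iff _ _).mp hc)
    rw [if_pos hcl, if_pos h]
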